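-- pv_equiv track=rewrite | github.com/cszaiti/SDP | vulberta/pattern.py | _getIndent
-- ===== SOURCE A (Python) =====
-- def _getIndent(str_):
--     res = ""
--     for ch in str_:
--         if ch in ["\t", " "]:
--             res += ch
--         else:
--             break
--     return res
-- ===== SOURCE B (Python) =====
-- def _getIndent(str_):
--     stripped = str_.lstrip(" \t")
--     return str_[:len(str_) - len(stripped)]
-- ===== Notes on version B (the rewrite author's own statement) =====
-- stated objective: simpler
-- what changed: Replaces the character-accumulation loop with a strip of leading tabs and spaces plus a length-difference prefix slice (strip-measure-slice, no explicit loop).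
import Mathlib
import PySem

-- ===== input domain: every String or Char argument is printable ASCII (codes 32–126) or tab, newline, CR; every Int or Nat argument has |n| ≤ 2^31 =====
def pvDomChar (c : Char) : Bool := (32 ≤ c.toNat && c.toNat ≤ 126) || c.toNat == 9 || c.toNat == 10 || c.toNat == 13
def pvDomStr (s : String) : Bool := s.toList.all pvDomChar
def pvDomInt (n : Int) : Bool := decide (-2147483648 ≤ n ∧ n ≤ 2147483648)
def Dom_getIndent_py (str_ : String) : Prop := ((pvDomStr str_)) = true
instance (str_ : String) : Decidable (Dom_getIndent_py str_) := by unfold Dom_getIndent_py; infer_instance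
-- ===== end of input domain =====

-- B replaces A's character-accumulation loop with lstrip(" \t") and a length-difference prefix slice (simpler decomposition).


-- ===== PORT A =====
-- the for-loop with break, res accumulated left-to-right
def getIndentLoop : List Char → List Char → List Char
  | [], res => res
  | c :: rest, res => if c = '\t' ∨ c = ' ' then getIndentLoop rest (res ++ [c]) else res

def getIndent_py (str_ : String) : String :=
  String.ofList (getIndentLoop str_.toList [])

-- ===== PORT B =====
-- str_.lstrip(" \t") ported by hand as dropWhile on code points (exact: lstrip removes the
-- maximal leading run of characters from the given set)
def lstripTabSpace (cs : List Char) : List Char :=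
  cs.dropWhile (fun c => c = '\t' ∨ c = ' ')

def getIndent_py_alt (str_ : String) : String :=
  let cs := str_.toList
  let stripped := lstripTabSpace cs
  String.ofList (PySem.List.slice cs none (some ((cs.length : Int) - (stripped.length : Int))))

-- ===== PRECONDITION & SPEC =====
def Spec_getIndent_py (str_ : String) (out : String) : Prop := out = getIndent_py_alt str_
instance (str_ : String) (out : String) : Decidable (Spec_getIndent_py str_ out) := by unfold Spec_getIndent_py; infer_instance

-- ===== CLAIM (what is proved, stated in full; the proofs are below) =====
def Claim_equal_getIndent_py : Prop := ∀ (str_ : String), Dom_getIndent_py str_ → Spec_getIndent_py str_ (getIndent_py str_)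

-- ===== LEMMAS AND PROOFS =====
theorem getIndentLoop_eq (cs res : List Char) :
    getIndentLoop cs res = res ++ cs.takeWhile (fun c => decide (c = '\t' ∨ c = ' ')) := by
  induction cs generalizing res with
  | nil => simp [getIndentLoop]
  | cons c rest ih =>
    by_cases h : c = '\t' ∨ c = ' '
    · simp [getIndentLoop, h, ih]
    · simp [getIndentLoop, h]

theorem slice_eq_takeWhile (cs : List Char) :
    PySem.List.slice cs none (some ((cs.length : Int) - ((lstripTabSpace cs).length : Int)))
      = cs.takeWhile (fun c => decide (c = '\t' ∨ c = ' ')) := by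
  have hsum : (cs.takeWhile (fun c => decide (c = '\t' ∨ c = ' '))).length
      + (cs.dropWhile (fun c => decide (c = '\t' ∨ c = ' '))).length = cs.length := by
    conv_rhs => rw [← List.takeWhile_append_dropWhile
      (p := fun c => decide (c = '\t' ∨ c = ' ')) (l := cs)]
    exact (List.length_append ..).symm
  have hcast : ((cs.length : Int) - ((lstripTabSpace cs).length : Int))
      = (((cs.takeWhile (fun c => decide (c = '\t' ∨ c = ' '))).length : Nat) : Int) := by
    unfold lstripTabSpace; omega
  rw [hcast, PySem.List.slice_to_natCast]
  exact (List.prefix_iff_eq_take.mp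
    (List.takeWhile_prefix (fun c => decide (c = '\t' ∨ c = ' ')))).symm

theorem alt_eq (s : String) :
    getIndent_py_alt s = String.ofList (s.toList.takeWhile (fun c => decide (c = '\t' ∨ c = ' '))) := by
  unfold getIndent_py_alt
  exact congrArg String.ofList (slice_eq_takeWhile s.toList)

-- ===== VERDICT (by name: the statement is the Claim_ definition above) =====
theorem getIndent_py_spec : Claim_equal_getIndent_py := by
  intro s _
  unfold Spec_getIndent_py getIndent_py
  rw [getIndentLoop_eq, alt_eq, List.nil_append]
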